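-- pv_equiv track=rewrite | github.com/gygy7151/pythonTest | kakao/2022summer/2..py | solution
-- ===== SOURCE A (Python) =====
-- def solution(queue1, queue2):
--     answer = 0
--     target = (sum(queue1) + sum(queue2)) // 2
--     n = len(queue1)
--     for _ in range(n//2):
--         a = queue1.pop(0)
--         queue2.append(a)
--         answer += 1
--         sum1, sum2 = sum(queue1), sum(queue2)
--         if sum(queue1) == target and sum(queue2) == target:
--             return answer
--         else:
--             b = queue2.pop(0)
--             queue1.append(b)
--             answer += 1
--             sum1, sum2 = sum(queue1), sum(queue2)
--             if sum(queue1) == target and sum(queue2) == target: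
--                 return answer
--     sum1, sum2 = sum(queue1), sum(queue2)
--     if sum(queue1) != target or sum(queue2) != target:
--         answer = -1
--     return answer
-- ===== SOURCE B (Python) =====
-- def solution(queue1, queue2):
--     # O(n) simulation of the same alternating moves, with running sums
--     # and read-only indexing instead of pop(0)/append and re-summing.
--     s1, s2 = sum(queue1), sum(queue2)
--     target = (s1 + s2) // 2
--     stream2 = queue2 + queue1  # elements that leave queue2, in order
--     answer = 0
--     for i in range(len(queue1) // 2):
--         x = queue1[i]
--         s1 -= x
--         s2 += x
--         answer += 1
--         if s1 == target and s2 == target: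
--             return answer
--         y = stream2[i]
--         s2 -= y
--         s1 += y
--         answer += 1
--         if s1 == target and s2 == target:
--             return answer
--     return answer if s1 == target and s2 == target else -1
-- ===== Notes on version B (the rewrite author's own statement) =====
-- stated objective: faster
-- what changed: B simulates the same alternating moves with read-only indices into queue1 and queue2+queue1 and two running sums, instead of A's pop(0)/append mutation and re-summing both queues at every step.
import Mathlib
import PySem

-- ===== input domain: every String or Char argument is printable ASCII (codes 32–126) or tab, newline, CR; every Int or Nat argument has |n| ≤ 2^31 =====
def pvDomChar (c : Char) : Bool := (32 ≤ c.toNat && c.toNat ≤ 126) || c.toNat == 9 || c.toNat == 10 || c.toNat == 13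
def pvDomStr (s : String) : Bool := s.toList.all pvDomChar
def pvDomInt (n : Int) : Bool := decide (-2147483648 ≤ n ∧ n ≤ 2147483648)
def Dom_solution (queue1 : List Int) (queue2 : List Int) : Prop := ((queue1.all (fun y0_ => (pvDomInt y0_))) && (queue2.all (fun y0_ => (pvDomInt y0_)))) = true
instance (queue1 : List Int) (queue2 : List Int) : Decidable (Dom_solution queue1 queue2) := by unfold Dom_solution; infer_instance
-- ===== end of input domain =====

-- B replaces A's repeated pop(0)/append and full re-summing by read-only indexing
-- with running sums (O(n) instead of O(n^2)); A mutates its arguments in place, B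
-- does not — the equivalence proved here is about the return value only.

-- ===== PORT A =====
-- the for-loop of A: fuel = remaining iterations of `range(n//2)`; state = the two
-- mutable lists and `answer`.  The `[] => 0` branches are unreachable (queue1 keeps
-- its initial length ≥ 2 whenever the loop body runs, and queue2 was just appended to),
-- mirroring that Python's pop(0) never raises here.
def aLoop (target : Int) : Nat → List Int → List Int → Int → Int
  | 0, q1, q2, ans =>
    -- `if sum(queue1) != target or sum(queue2) != target: answer = -1`
    if q1.sum ≠ target ∨ q2.sum ≠ target then -1 else ans
  | _+1, [], _, _ => 0
  | k+1, a :: q1t, q2, ans =>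
    let q2a := q2 ++ [a]
    if q1t.sum = target ∧ q2a.sum = target then ans + 1
    else
      -- b = queue2.pop(0): queue2 was just appended to, so it is nonempty and
      -- headD/tail is exactly Python's pop(0) here
      let b := q2a.headD 0
      let q2t := q2a.tail
      let q1b := q1t ++ [b]
      if q1b.sum = target ∧ q2t.sum = target then ans + 1 + 1
      else aLoop target k q1b q2t (ans + 1 + 1)

def solution (queue1 : List Int) (queue2 : List Int) : Int :=
  let target := PySem.Int.floordiv (queue1.sum + queue2.sum) 2
  aLoop target (queue1.length / 2) queue1 queue2 0

-- ===== PORT B =====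
-- the for-loop of Source B: fuel = remaining iterations, i = loop index, running sums.
-- `queue1[i]` / `stream2[i]` are always in range in Source B, so `getD _ 0` is exact.
def bLoop (Q1 S2 : List Int) (target : Int) : Nat → Nat → Int → Int → Int → Int
  | 0, _, s1, s2, ans => if s1 = target ∧ s2 = target then ans else -1
  | k+1, i, s1, s2, ans =>
    let x := Q1.getD i 0
    let s1' := s1 - x
    let s2' := s2 + x
    if s1' = target ∧ s2' = target then ans + 1
    else
      let y := S2.getD i 0
      let s2'' := s2' - y
      let s1'' := s1' + y
      if s1'' = target ∧ s2'' = target then ans + 1 + 1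
      else bLoop Q1 S2 target k (i+1) s1'' s2'' (ans + 1 + 1)

def solution_alt (queue1 : List Int) (queue2 : List Int) : Int :=
  let s1 := queue1.sum
  let s2 := queue2.sum
  let target := PySem.Int.floordiv (s1 + s2) 2
  let stream2 := queue2 ++ queue1
  bLoop queue1 stream2 target (queue1.length / 2) 0 s1 s2 0

-- ===== PRECONDITION & SPEC =====
def Spec_solution (queue1 : List Int) (queue2 : List Int) (out : Int) : Prop := out = solution_alt queue1 queue2
instance (queue1 : List Int) (queue2 : List Int) (out : Int) : Decidable (Spec_solution queue1 queue2 out) := by unfold Spec_solution; infer_instance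

-- ===== CLAIM (what is proved, stated in full; the proofs are below) =====
def Claim_equal_solution : Prop := ∀ (queue1 : List Int) (queue2 : List Int), Dom_solution queue1 queue2 → Spec_solution queue1 queue2 (solution queue1 queue2)

-- ===== LEMMAS AND PROOFS =====

-- Invariant: after `i` full iterations, A's queue1 is `Q1.drop i ++ (Q2 ++ Q1).take i`
-- (remaining originals plus the elements moved back from queue2) and A's queue2 is
-- `(Q2 ++ Q1.take i).drop i`, while B carries their sums.
theorem loop_eq (Q1 Q2 : List Int) (target : Int) (k : Nat) :
    ∀ (i : Nat) (ans : Int), i + k = Q1.length / 2 →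
      aLoop target k (Q1.drop i ++ (Q2 ++ Q1).take i) ((Q2 ++ Q1.take i).drop i) ans
        = bLoop Q1 (Q2 ++ Q1) target k i
            ((Q1.drop i ++ (Q2 ++ Q1).take i).sum) (((Q2 ++ Q1.take i).drop i).sum) ans := by
  induction k with
  | zero =>
    intro i ans h
    simp only [aLoop, bLoop]
    split_ifs with h1 h2 <;> tauto
  | succ k ih =>
    intro i ans h
    have hiQ : i < Q1.length := by omega
    have hiS : i < (Q2 ++ Q1).length := by simp; omega
    have etk : Q1.take (i+1) = Q1.take i ++ [Q1[i]] := by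
      rw [List.take_add_one, List.getElem?_eq_getElem hiQ]; rfl
    have hiC : i < (Q2 ++ Q1.take (i+1)).length := by simp; omega
    have e4 : (Q2 ++ Q1.take (i+1))[i]'hiC = (Q2 ++ Q1)[i]'hiS := by
      rcases Nat.lt_or_ge i Q2.length with h' | h'
      · rw [List.getElem_append_left h', List.getElem_append_left h']
      · rw [List.getElem_append_right h', List.getElem_append_right h', List.getElem_take]
    have e1 : Q1.drop i ++ (Q2 ++ Q1).take i
        = Q1[i] :: (Q1.drop (i+1) ++ (Q2 ++ Q1).take i) := by
      rw [List.drop_eq_getElem_cons hiQ]; rfl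
    have e2 : (Q2 ++ Q1.take i).drop i ++ [Q1[i]] = (Q2 ++ Q1.take (i+1)).drop i := by
      rw [etk, ← List.append_assoc]
      exact (List.drop_append_of_le_length (by simp; omega)).symm
    have e3 : (Q2 ++ Q1.take (i+1)).drop i
        = (Q2 ++ Q1)[i] :: (Q2 ++ Q1.take (i+1)).drop (i+1) := by
      rw [List.drop_eq_getElem_cons hiC, e4]
    have etkS : (Q2 ++ Q1).take (i+1) = (Q2 ++ Q1).take i ++ [(Q2 ++ Q1)[i]] := by
      rw [List.take_add_one, List.getElem?_eq_getElem hiS]; rfl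
    rw [e1]
    simp only [aLoop, bLoop, List.getD_eq_getElem Q1 0 hiQ,
      List.getD_eq_getElem (Q2 ++ Q1) 0 hiS]
    rw [e2, e3]
    have hq2 : (List.drop i (Q2 ++ List.take i Q1)).sum + Q1[i]
        = (Q2 ++ Q1)[i] + (List.drop (i+1) (Q2 ++ List.take (i+1) Q1)).sum := by
      have := congrArg List.sum (e2.trans e3)
      simpa using this
    have hrec := ih (i+1) (ans + 1 + 1) (by omega)
    simp only [List.headD_cons, List.tail_cons, List.sum_cons, List.sum_append,
      List.sum_nil, add_zero]
    split_ifs with h1 h2 h3 h4 h5 h6 <;> try omega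
    · -- both loops continue: recursive case, invariant at i+1
      rw [List.append_assoc, ← etkS, hrec]
      congr 1
      · simp only [etkS, List.sum_append, List.sum_cons, List.sum_nil, add_zero]; ring
      · omega

-- ===== VERDICT (by name: the statement is the Claim_ definition above) =====
theorem solution_spec : Claim_equal_solution := by
  intro q1 q2 _
  show solution q1 q2 = solution_alt q1 q2
  have h := loop_eq q1 q2 (PySem.Int.floordiv (q1.sum + q2.sum) 2) (q1.length / 2) 0 0 (by omega)
  simpa [solution, solution_alt] using h
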